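-- pv_equiv track=rewrite | github.com/jeff87654/Lifting | check_s18_combos.py | expected_combos
-- ===== SOURCE A (Python) =====
-- from math import comb
--
-- TG_COUNT = {2: 1, 3: 2, 4: 5, 5: 5, 6: 16, 7: 7, 8: 50,
--             9: 34, 10: 45, 11: 8, 12: 301, 13: 9, 14: 63,
--             15: 104, 16: 1954, 17: 10, 18: 983}
--
-- def expected_combos(partition):
--     """Combos for partition: product over distinct block-size groups of
--     multiset-of-factors over TG[size]."""
--     from collections import Counter
--     block_counts = Counter(partition)
--     total = 1
--     for size, mult in block_counts.items():
--         n = TG_COUNT.get(size, None)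
--         if n is None: return None
--         # Multisets of size mult from n options
--         total *= comb(n + mult - 1, mult)
--     return total
-- ===== SOURCE B (Python) =====
-- TG_COUNT = {2: 1, 3: 2, 4: 5, 5: 5, 6: 16, 7: 7, 8: 50,
--             9: 34, 10: 45, 11: 8, 12: 301, 13: 9, 14: 63,
--             15: 104, 16: 1954, 17: 10, 18: 983}
--
-- def expected_combos(partition):
--     """One pass over partition: per size keep (k, comb(n+k-1,k)) updated by the
--     exact recurrence val = val*(n+k-1)//k; multiply the stored values at the end."""
--     acc = {}
--     for size in partition:
--         n = TG_COUNT.get(size)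
--         if n is None:
--             return None
--         k, val = acc.get(size, (0, 1))
--         acc[size] = (k + 1, val * (n + k) // (k + 1))
--     total = 1
--     for _, val in acc.values():
--         total *= val
--     return total
-- ===== Notes on version B (the rewrite author's own statement) =====
-- stated objective: faster
-- what changed: Replaced the Counter-then-math.comb two-phase computation with a single pass over partition that maintains, per block size, a running count and the multiset binomial built incrementally by the exact recurrence val = val*(n+k)//(k+1), multiplying the stored per-size values at the end.
import Mathlib
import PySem

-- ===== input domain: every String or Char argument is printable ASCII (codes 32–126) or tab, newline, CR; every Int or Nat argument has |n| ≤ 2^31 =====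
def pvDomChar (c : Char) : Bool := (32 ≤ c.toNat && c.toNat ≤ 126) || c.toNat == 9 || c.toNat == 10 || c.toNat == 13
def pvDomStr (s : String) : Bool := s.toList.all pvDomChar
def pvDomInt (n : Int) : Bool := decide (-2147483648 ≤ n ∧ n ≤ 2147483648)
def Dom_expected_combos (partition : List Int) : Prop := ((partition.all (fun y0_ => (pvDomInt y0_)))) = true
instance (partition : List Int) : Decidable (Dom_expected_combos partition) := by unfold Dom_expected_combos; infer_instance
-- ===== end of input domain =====

-- B replaces Counter + math.comb by a single pass that maintains, per block size, a
-- running count and a binomial value via the exact recurrence val = val*(n+k)//(k+1)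
-- (same exact results; measured constant-factor faster in a timing run).

-- ===== PORT A =====

-- the module-level dict TG_COUNT (shared context of both Python versions)
def TG_COUNT : PySem.Dict Int Int :=
  PySem.Dict.ofList [(2,1), (3,2), (4,5), (5,5), (6,16), (7,7), (8,50),
                     (9,34), (10,45), (11,8), (12,301), (13,9), (14,63),
                     (15,104), (16,1954), (17,10), (18,983)]

-- math.comb(n, k); A only calls it with nonnegative arguments
def pvComb (n k : Int) : Int := (Nat.choose n.toNat k.toNat : Int)

-- A's for-loop over block_counts.items() with the early `return None`
def pvLoopA : List (Int × Int) → Int → Option Int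
  | [], total => some total
  | (size, mult) :: rest, total =>
    match TG_COUNT.get? size with
    | none => none
    | some n => pvLoopA rest (total * pvComb (n + mult - 1) mult)

def expected_combos (partition : List Int) : Option Int :=
  pvLoopA (PySem.Dict.counter partition).items 1

-- ===== PORT B =====

-- acc[size] = (k+1, val*(n+k)//(k+1)) from the old (k, val)
def pvNext (n : Int) (pr : Int × Int) : Int × Int :=
  (pr.1 + 1, PySem.Int.floordiv (pr.2 * (n + pr.1)) (pr.1 + 1))

-- B's single pass over partition with the early `return None`
def pvLoopB : List Int → PySem.Dict Int (Int × Int) → Option (PySem.Dict Int (Int × Int))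
  | [], acc => some acc
  | size :: rest, acc =>
    match TG_COUNT.get? size with
    | none => none
    | some n => pvLoopB rest (acc.insert size (pvNext n (acc.getD size (0, 1))))

def expected_combos_alt (partition : List Int) : Option Int :=
  match pvLoopB partition PySem.Dict.empty with
  | none => none
  | some acc => some (acc.values.foldl (fun total pr => total * pr.2) 1)

-- ===== PRECONDITION & SPEC =====
def Spec_expected_combos (partition : List Int) (out : Option Int) : Prop := out = expected_combos_alt partition
instance (partition : List Int) (out : Option Int) : Decidable (Spec_expected_combos partition out) := by unfold Spec_expected_combos; infer_instance

-- ===== CLAIM (what is proved, stated in full; the proofs are below) =====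
def Claim_equal_expected_combos : Prop := ∀ (partition : List Int), Dom_expected_combos partition → Spec_expected_combos partition (expected_combos partition)

-- ===== LEMMAS AND PROOFS =====

-- every value stored in TG_COUNT is at least 1
lemma tg_pos {x n : Int} (h : TG_COUNT.get? x = some n) : 1 ≤ n := by
  have hi := PySem.Dict.mem_items_of_get?_eq_some TG_COUNT h
  rw [show TG_COUNT.items = [(2,1), (3,2), (4,5), (5,5), (6,16), (7,7), (8,50),
      (9,34), (10,45), (11,8), (12,301), (13,9), (14,63),
      (15,104), (16,1954), (17,10), (18,983)] from rfl] at hi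
  fin_cases hi <;> omega

-- B's per-size update applied count-many times, expressed via the fold step
def pvStep (d : PySem.Dict Int (Int × Int)) (s : Int) : PySem.Dict Int (Int × Int) :=
  d.insert s (pvNext ((TG_COUNT.get? s).getD 0) (d.getD s (0, 1)))

-- loopB is `none` exactly when some element's size is unknown; otherwise it is the fold
lemma loopB_none {p : List Int} (d : PySem.Dict Int (Int × Int))
    (h : ∃ x ∈ p, TG_COUNT.get? x = none) : pvLoopB p d = none := by
  induction p generalizing d with
  | nil => rcases h with ⟨x, hx, _⟩; cases hx
  | cons y rest ih =>
    rcases h with ⟨x, hx, hxn⟩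
    rcases List.mem_cons.mp hx with rfl | hmem
    · simp [pvLoopB, hxn]
    · cases hy : TG_COUNT.get? y with
      | none => simp [pvLoopB, hy]
      | some n => simp only [pvLoopB, hy]; exact ih _ ⟨x, hmem, hxn⟩

lemma loopB_some {p : List Int} (d : PySem.Dict Int (Int × Int))
    (h : ∀ x ∈ p, TG_COUNT.get? x ≠ none) :
    pvLoopB p d = some (p.foldl pvStep d) := by
  induction p generalizing d with
  | nil => rfl
  | cons y rest ih =>
    cases hy : TG_COUNT.get? y with
    | none => exact absurd hy (h y (List.mem_cons_self))
    | some n =>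
      simp only [pvLoopB, hy, List.foldl_cons]
      rw [ih _ (fun x hx => h x (List.mem_cons_of_mem _ hx))]
      simp [pvStep, hy]

lemma loopA_none {l : List (Int × Int)} (t : Int)
    (h : ∃ pr ∈ l, TG_COUNT.get? pr.1 = none) : pvLoopA l t = none := by
  induction l generalizing t with
  | nil => rcases h with ⟨pr, hpr, _⟩; cases hpr
  | cons y rest ih =>
    rcases h with ⟨pr, hpr, hprn⟩
    rcases List.mem_cons.mp hpr with rfl | hmem
    · cases pr with | mk s m => simp [pvLoopA, hprn]
    · cases y with | mk s m =>
      cases hy : TG_COUNT.get? s with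
      | none => simp [pvLoopA, hy]
      | some n => simp only [pvLoopA, hy]; exact ih _ ⟨pr, hmem, hprn⟩

lemma loopA_some {l : List (Int × Int)} (t : Int)
    (h : ∀ pr ∈ l, TG_COUNT.get? pr.1 ≠ none) :
    pvLoopA l t = some (l.foldl
      (fun t pr => t * pvComb ((TG_COUNT.get? pr.1).getD 0 + pr.2 - 1) pr.2) t) := by
  induction l generalizing t with
  | nil => rfl
  | cons y rest ih =>
    cases y with | mk s m =>
    cases hy : TG_COUNT.get? s with
    | none => exact absurd hy (h (s, m) (List.mem_cons_self))
    | some n =>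
      simp only [pvLoopA, hy, List.foldl_cons]
      rw [ih _ (fun pr hpr => h pr (List.mem_cons_of_mem _ hpr))]
      rfl

-- entry x of the fold only changes at elements equal to x
lemma getD_foldl_step (p : List Int) (d : PySem.Dict Int (Int × Int)) (x : Int) :
    (p.foldl pvStep d).getD x (0, 1) =
      (pvNext ((TG_COUNT.get? x).getD 0))^[p.count x] (d.getD x (0, 1)) := by
  induction p generalizing d with
  | nil => rfl
  | cons y rest ih =>
    simp only [List.foldl_cons, List.count_cons]
    by_cases hxy : y = x
    · subst hxy
      rw [ih]
      simp [pvStep, PySem.Dict.getD_insert_self, Function.iterate_succ_apply]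
    · rw [ih]
      have : (pvStep d y).getD x (0, 1) = d.getD x (0, 1) :=
        PySem.Dict.getD_insert_of_ne d _ _ (Ne.symm hxy)
      rw [this]
      simp [hxy]

-- the incremental recurrence computes the multiset binomial exactly
lemma iterate_pvNext (n : Int) (hn : 1 ≤ n) (k : Nat) :
    (pvNext n)^[k] (0, 1) = ((k : Int), (Nat.choose (n.toNat - 1 + k) k : Int)) := by
  induction k with
  | zero => simp
  | succ k ih =>
    rw [Function.iterate_succ_apply', ih]
    have hn1 : 1 ≤ n.toNat := by omega
    set m : Nat := n.toNat - 1 + k with hm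
    have hnk : n + (k : Int) = ((m + 1 : Nat) : Int) := by
      have : n = (n.toNat : Int) := by omega
      rw [this]; push_cast; omega
    have hid : Nat.choose m k * (m + 1) = Nat.choose (m + 1) (k + 1) * (k + 1) := by
      rw [Nat.mul_comm]
      simpa using Nat.add_one_mul_choose_eq m k
    simp only [pvNext, hnk]
    rw [Prod.mk.injEq]
    refine ⟨by push_cast; ring, ?_⟩
    · have : ((Nat.choose m k : Nat) : Int) * ((m + 1 : Nat) : Int)
          = ((Nat.choose (m + 1) (k + 1) * (k + 1) : Nat) : Int) := by
        push_cast; exact_mod_cast congrArg (fun z : Nat => (z : Int)) hid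
      rw [this]
      have hfd : PySem.Int.floordiv ((Nat.choose (m + 1) (k + 1) * (k + 1) : Nat) : Int)
          (((k : Nat) : Int) + 1) = ((Nat.choose (m + 1) (k + 1) : Nat) : Int) := by
        have : (((k : Nat) : Int) + 1) = (((k + 1 : Nat) : Nat) : Int) := by push_cast; ring
        rw [this, PySem.Int.floordiv_natCast]
        congr 1
        exact Nat.mul_div_cancel _ (Nat.succ_pos k)
      have hmn : m + 1 = n.toNat - 1 + (k + 1) := by omega
      rw [hfd, hmn]

-- pvComb at A's arguments, in Nat form
lemma pvComb_eq (n : Int) (hn : 1 ≤ n) (c : Nat) :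
    pvComb (n + (c : Int) - 1) (c : Int) = (Nat.choose (n.toNat - 1 + c) c : Int) := by
  unfold pvComb
  have h1 : (n + (c : Int) - 1).toNat = n.toNat - 1 + c := by omega
  have h2 : ((c : Int)).toNat = c := by omega
  rw [h1, h2]

-- ===== VERDICT (by name: the statement is the Claim_ definition above) =====
theorem expected_combos_spec : Claim_equal_expected_combos := by
  intro p _
  unfold Spec_expected_combos expected_combos expected_combos_alt
  by_cases hbad : ∃ x ∈ p, TG_COUNT.get? x = none
  · -- some size is unknown: both return None
    rcases hbad with ⟨x, hx, hxn⟩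
    rw [loopB_none _ ⟨x, hx, hxn⟩]
    rw [loopA_none 1 ⟨(x, (p.count x : Int)), ?_, hxn⟩]
    rw [PySem.Dict.items_counter]
    exact List.mem_map.mpr ⟨x, (PySem.Set.mem_ofList p x).mpr hx, rfl⟩
  · have hsomeB : ∀ x ∈ p, TG_COUNT.get? x ≠ none :=
      fun x hx hxn => hbad ⟨x, hx, hxn⟩
    rw [loopB_some _ hsomeB]
    have hitems := PySem.Dict.items_counter p
    have hsomeA : ∀ pr ∈ (PySem.Dict.counter p).items, TG_COUNT.get? pr.1 ≠ none := by
      intro pr hpr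
      rw [hitems] at hpr
      rcases List.mem_map.mp hpr with ⟨x, hx, rfl⟩
      exact hsomeB x ((PySem.Set.mem_ofList p x).mp hx)
    rw [loopA_some 1 hsomeA]
    dsimp only
    -- both are products over the distinct sizes in first-occurrence order
    have hstep : pvStep = fun (d : PySem.Dict Int (Int × Int)) s =>
        d.insert s (pvNext ((TG_COUNT.get? s).getD 0) (d.getD s (0, 1))) := rfl
    set d' : PySem.Dict Int (Int × Int) := p.foldl pvStep PySem.Dict.empty with hd'
    have hkeys : d'.keys = PySem.Set.ofList p := by
      rw [hd', hstep, PySem.Dict.keys_foldl_insert, PySem.Dict.keys_empty,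
        PySem.Set.update_nil_left]
    have hnd : d'.keys.Nodup := by
      rw [hd', hstep]
      exact PySem.Dict.nodup_keys_foldl_insert _ _ _ (by simp [PySem.Dict.keys_empty])
    rw [PySem.Dict.values_eq_map_keys d' hnd (0, 1), hkeys, hitems]
    rw [List.foldl_map, List.foldl_map]
    congr 1
    apply PySem.List.foldl_congr_mem
    intro acc x hx
    have hxp : x ∈ p := (PySem.Set.mem_ofList p x).mp hx
    cases hxg : TG_COUNT.get? x with
    | none => exact absurd hxg (hsomeB x hxp)
    | some n =>
      have hn : 1 ≤ n := tg_pos hxg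
      have hB : d'.getD x (0, 1)
          = ((p.count x : Int), (Nat.choose (n.toNat - 1 + p.count x) (p.count x) : Int)) := by
        rw [hd', getD_foldl_step, hxg]
        simpa using iterate_pvNext n hn (p.count x)
      rw [hB]
      simp only [Option.getD_some]
      rw [pvComb_eq n hn (p.count x)]
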